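-- pv_equiv track=rewrite | github.com/hisatsu/hisatsu | decodeer.py | renc
-- ===== SOURCE A (Python) =====
-- refer = {0:'0',1:'1',2:'2',3:'3',4:'4',5:'5',6:'6',7:'7',8:'8',9:'9',10:'a',11:'b',12:'c',13:'d',14:'e',15:'f'}
--
-- def enc(x):
--     a = list(bin(ord(x)))[2:]
--     # a.pop(0)
--     # a.pop(0)
--     b = [a[i:i+4] for i in range(0,len(a),4)]
--
--
--     c = [int(''.join(i),2) for i in b]
--
--     new = [refer[i] for i in c]
--     return ''.join(new)
--
-- def renc(xs):
--     ly = []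
--     for i in xs:
--         ly.append(enc(i))
--     a = [i for i in range(len(ly)-1) if len(ly[i]) != len(ly[i+1])]
--     for i in range(len(a)):
--         ly.insert(a[i]+1+i,'|')
--     return ''.join(ly)
-- ===== SOURCE B (Python) =====
-- def enc(x):
--     n = ord(x)
--     r = n.bit_length() % 4
--     if n < 16 or r == 0:
--         return format(n, 'x')
--     return format(n >> r, 'x') + format(n & (1 << r) - 1, 'x')
--
-- def renc(xs):
--     parts = []
--     prev = None
--     for c in xs:
--         t = enc(c)
--         if prev is not None and len(t) != prev:
--             parts.append('|')
--         parts.append(t)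
--         prev = len(t)
--     return ''.join(parts)
-- ===== Notes on version B (the rewrite author's own statement) =====
-- stated objective: simpler
-- what changed: renc becomes a single streaming pass that appends the separator when the current token's length differs from the previous one (instead of computing change-point indices and doing positional list.insert with shifting offsets), and enc computes the nibble chunks by bit arithmetic (bit_length/shift/mask) instead of slicing the binary string.
import Mathlib
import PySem

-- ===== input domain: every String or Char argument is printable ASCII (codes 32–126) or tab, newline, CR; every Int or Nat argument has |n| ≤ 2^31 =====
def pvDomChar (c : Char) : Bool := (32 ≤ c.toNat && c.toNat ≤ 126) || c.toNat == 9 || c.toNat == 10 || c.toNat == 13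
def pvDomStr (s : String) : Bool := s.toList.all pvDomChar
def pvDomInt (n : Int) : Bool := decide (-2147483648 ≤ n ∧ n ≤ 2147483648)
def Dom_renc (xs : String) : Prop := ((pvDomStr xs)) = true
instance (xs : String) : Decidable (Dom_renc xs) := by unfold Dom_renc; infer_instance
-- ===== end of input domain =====

-- B replaces A's two-phase "compute change indices, then positional list.insert of separators"
-- by a single streaming pass carrying the previous token length, and computes enc by bit
-- arithmetic (bit_length / shift / mask) instead of slicing the binary string; objective: simpler.

-- ===== PORT A =====
-- bin(n)[2:] : binary digits of n, most significant first ('0' for n = 0); hand-ported (no PySem bin)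
-- structural fuel (fuel := n suffices since n/2 < n) so the kernel can evaluate
def binCharsF : Nat → Nat → List Char
  | 0, _ => []
  | fuel + 1, n => if n = 0 then [] else binCharsF fuel (n / 2) ++ [if n % 2 = 1 then '1' else '0']

def binChars (n : Nat) : List Char := binCharsF n n

def pyBin (n : Nat) : List Char := if n = 0 then ['0'] else binChars n

-- the module-level dict 'refer'
def refer : PySem.Dict Int (List Char) :=
  PySem.Dict.ofList [(0, ['0']), (1, ['1']), (2, ['2']), (3, ['3']), (4, ['4']), (5, ['5']),
    (6, ['6']), (7, ['7']), (8, ['8']), (9, ['9']), (10, ['a']), (11, ['b']), (12, ['c']),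
    (13, ['d']), (14, ['e']), (15, ['f'])]

-- enc(x) of A, on the code point; strings carried as List Char
def encA (n : Nat) : List Char :=
  let a := pyBin n
  let b := (PySem.List.pyRange 0 (a.length : Int) 4).map
    (fun i => PySem.List.slice a (some i) (some (i + 4)))
  let c := b.map (fun i => (PySem.Int.ofCharsBase? (PySem.Chars.join [] [i]) 2).getD 0)
  let new := c.map (fun i => refer.getD i [])
  PySem.Chars.join [] new

def renc (xs : String) : String :=
  let ly := xs.toList.foldl (fun ly i => ly ++ [encA i.toNat]) ([] : List (List Char))
  let a := (PySem.List.pyRange 0 ((ly.length : Int) - 1) 1).filter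
    (fun i => decide ((PySem.List.pyGetD ly i []).length ≠ (PySem.List.pyGetD ly (i + 1) []).length))
  let ly2 := (PySem.List.pyRange 0 (a.length : Int) 1).foldl
    (fun l i => PySem.List.insert l (PySem.List.pyGetD a i 0 + 1 + i) ['|']) ly
  String.ofList (PySem.Chars.join [] ly2)

-- ===== PORT B =====
-- format(n, 'x'): lowercase hex digits, no prefix
def hexDigit (k : Nat) : Char := (['0','1','2','3','4','5','6','7','8','9','a','b','c','d','e','f']).getD k '0'

-- structural fuel, as in binCharsF
def hexCharsPosF : Nat → Nat → List Char
  | 0, _ => []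
  | fuel + 1, n => if n = 0 then [] else hexCharsPosF fuel (n / 16) ++ [hexDigit (n % 16)]

def hexCharsPos (n : Nat) : List Char := hexCharsPosF n n

def hexChars (n : Nat) : List Char := if n = 0 then ['0'] else hexCharsPos n

-- enc(x) of B: split off the low (bit_length % 4) bits, hex both parts
def encB (n : Nat) : List Char :=
  let r := PySem.Int.bitLength (n : Int) % 4
  if n < 16 ∨ r = 0 then hexChars n
  else hexChars (n >>> r) ++ hexChars (n &&& ((1 <<< r) - 1))

-- the loop body of B's renc: state = (parts, prev)
def stepB (st : List (List Char) × Option Nat) (c : Char) : List (List Char) × Option Nat :=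
  let t := encB c.toNat
  let parts := match st.2 with
    | some p => if t.length ≠ p then st.1 ++ [['|']] else st.1
    | none => st.1
  (parts ++ [t], some t.length)

def renc_alt (xs : String) : String :=
  String.ofList (PySem.Chars.join [] (xs.toList.foldl stepB ([], none)).1)

-- ===== PRECONDITION & SPEC =====
def Spec_renc (xs : String) (out : String) : Prop := out = renc_alt xs
instance (xs : String) (out : String) : Decidable (Spec_renc xs out) := by unfold Spec_renc; infer_instance

-- ===== CLAIM (what is proved, stated in full; the proofs are below) =====
def Claim_equal_renc : Prop := ∀ (xs : String), Dom_renc xs → Spec_renc xs (renc xs)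

-- ===== LEMMAS AND PROOFS =====

-- enc agrees on every code point of the domain (all are < 127): by computation
set_option maxRecDepth 8192 in
theorem encA_eq_encB : ∀ n < 127, encA n = encB n := by decide

-- the reference shape: the token list with '|' inserted at every length change
def sepFrom (p : Nat) : List (List Char) → List (List Char)
  | [] => []
  | t :: ts => (if t.length ≠ p then [['|'], t] else [t]) ++ sepFrom t.length ts

def sepList : List (List Char) → List (List Char)
  | [] => []
  | t :: ts => t :: sepFrom t.length ts

-- ---- B side ----
theorem foldl_stepB_some (cs : List Char) : ∀ (parts : List (List Char)) (p : Nat),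
    (cs.foldl stepB (parts, some p)).1 = parts ++ sepFrom p (cs.map (fun c => encB c.toNat)) := by
  induction cs with
  | nil => intro parts p; simp [sepFrom]
  | cons c cs ih =>
    intro parts p
    simp only [List.foldl_cons, List.map_cons, sepFrom, stepB]
    by_cases h : (encB c.toNat).length ≠ p
    · simp [h, ih]
    · simp [h, ih]

theorem foldl_stepB (cs : List Char) :
    (cs.foldl stepB ([], none)).1 = sepList (cs.map (fun c => encB c.toNat)) := by
  cases cs with
  | nil => simp [sepList]
  | cons c cs => simp [sepList, stepB, foldl_stepB_some]

-- ---- A side ----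
-- the change positions, in original coordinates
def chg : List (List Char) → List Nat
  | [] => []
  | [_] => []
  | t :: u :: ts => (if u.length ≠ t.length then [0] else []) ++ (chg (u :: ts)).map (· + 1)

-- the insertion loop, positions in original coordinates, off = separators already inserted
def applyIns : List Nat → Nat → List (List Char) → List (List Char)
  | [], _, l => l
  | j :: js, off, l => applyIns js (off + 1) (PySem.List.insert l ((j + 1 + off : Nat) : Int) ['|'])

theorem insert_natCast_clamp {α : Type} (xs : List α) (p : Nat) (v : α) :
    PySem.List.insert xs ((p : Nat) : Int) v = xs.take p ++ v :: xs.drop p := by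
  simp only [PySem.List.insert, PySem.List.sliceIndices]
  rw [if_neg (by omega), if_neg (by omega)]
  rw [show (min (p : Int) (xs.length : Int)).toNat = min p xs.length by omega]
  rcases Nat.le_total p xs.length with h | h
  · rw [Nat.min_eq_left h]
  · rw [Nat.min_eq_right h]
    simp [List.take_of_length_le, List.drop_of_length_le, h]

theorem insert_cons_succ (x : List Char) (l : List (List Char)) (p : Nat) (v : List Char) :
    PySem.List.insert (x :: l) ((p + 1 : Nat) : Int) v = x :: PySem.List.insert l (p : Int) v := by
  rw [insert_natCast_clamp, insert_natCast_clamp]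
  rfl

theorem applyIns_off_cons (js : List Nat) : ∀ (off : Nat) (x : List Char) (l : List (List Char)),
    applyIns js (off + 1) (x :: l) = x :: applyIns js off l := by
  induction js with
  | nil => intro off x l; simp [applyIns]
  | cons j js ih =>
    intro off x l
    have : (j + 1 + (off + 1)) = (j + 1 + off) + 1 := by omega
    simp only [applyIns, this, insert_cons_succ]
    exact ih (off + 1) x _

theorem applyIns_shift_cons (js : List Nat) : ∀ (off : Nat) (x : List Char) (l : List (List Char)),
    applyIns (js.map (· + 1)) off (x :: l) = x :: applyIns js off l := by
  induction js with
  | nil => intro off x l; simp [applyIns]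
  | cons j js ih =>
    intro off x l
    have : (j + 1 + 1 + off) = (j + 1 + off) + 1 := by omega
    simp only [List.map_cons, applyIns, this, insert_cons_succ]
    exact ih (off + 1) x _

theorem applyIns_chg (ly : List (List Char)) : applyIns (chg ly) 0 ly = sepList ly := by
  induction ly with
  | nil => simp [chg, applyIns, sepList]
  | cons t tl ih =>
    cases tl with
    | nil => simp [chg, applyIns, sepList, sepFrom]
    | cons u ts =>
      by_cases h : u.length ≠ t.length
      · show applyIns (chg (t :: u :: ts)) 0 (t :: u :: ts) = _
        rw [show chg (t :: u :: ts) = 0 :: (chg (u :: ts)).map (· + 1) by simp [chg, h]]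
        show applyIns _ 1 (PySem.List.insert (t :: u :: ts) ((1 : Nat) : Int) ['|']) = _
        rw [show ((1 : Nat) : Int) = ((0 + 1 : Nat) : Int) by norm_num, insert_cons_succ]
        rw [show PySem.List.insert (u :: ts) ((0 : Nat) : Int) ['|'] = ['|'] :: u :: ts by
          simpa using PySem.List.insert_natCast (u :: ts) 0 ['|'] (by simp)]
        rw [applyIns_off_cons, applyIns_shift_cons, ih]
        simp [sepList, sepFrom, h]
      · show applyIns (chg (t :: u :: ts)) 0 (t :: u :: ts) = _
        rw [show chg (t :: u :: ts) = (chg (u :: ts)).map (· + 1) by simp [chg, h]]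
        rw [applyIns_shift_cons, ih]
        rw [not_not] at h
        simp [sepList, sepFrom, h]

-- the port's filtered range is chg, cast to Int
theorem filter_range_nat (ly : List (List Char)) :
    (List.range (ly.length - 1)).filter
      (fun k => decide ((ly.getD k []).length ≠ (ly.getD (k + 1) []).length))
    = chg ly := by
  induction ly with
  | nil => simp [chg]
  | cons t tl ih =>
    cases tl with
    | nil => simp [chg]
    | cons u ts =>
      have hlen : (t :: u :: ts : List (List Char)).length - 1 = ((u :: ts : List (List Char)).length - 1) + 1 := by simp
      rw [hlen, List.range_succ_eq_map, List.filter_cons, List.filter_map]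
      have hrest : ((List.range ((u :: ts : List (List Char)).length - 1)).filter
          ((fun k => decide (((t :: u :: ts : List (List Char)).getD k []).length ≠ ((t :: u :: ts : List (List Char)).getD (k + 1) []).length)) ∘ Nat.succ)).map Nat.succ
          = (chg (u :: ts)).map (· + 1) := by
        rw [List.filter_congr (q := fun k => decide (((u :: ts : List (List Char)).getD k []).length ≠ ((u :: ts : List (List Char)).getD (k + 1) []).length))
          (by intro k _; rfl)]
        rw [ih]
      rw [hrest]
      show (if decide (t.length ≠ u.length) = true then _ else _) = _
      by_cases h : u.length ≠ t.length
      · rw [if_pos (by simpa using (ne_comm.mp h)), chg, if_pos h]; rfl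
      · rw [if_neg (by simpa using fun hh => h (ne_comm.mp hh)), chg, if_neg h]; rfl

theorem filter_range_eq_chg (ly : List (List Char)) :
    (PySem.List.pyRange 0 ((ly.length : Int) - 1) 1).filter
      (fun i => decide ((PySem.List.pyGetD ly i []).length ≠ (PySem.List.pyGetD ly (i + 1) []).length))
    = (chg ly).map (fun n : Nat => (n : Int)) := by
  rw [PySem.List.pyRange_one, List.filter_map]
  rw [show (((ly.length : Int) - 1) - 0).toNat = ly.length - 1 by omega]
  have hcond : ((List.range (ly.length - 1)).filter
      ((fun i => decide ((PySem.List.pyGetD ly i []).length ≠ (PySem.List.pyGetD ly (i + 1) []).length)) ∘ (fun k : Nat => (0 : Int) + k)))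
      = (List.range (ly.length - 1)).filter (fun k => decide ((ly.getD k []).length ≠ (ly.getD (k + 1) []).length)) := by
    apply List.filter_congr
    intro k _
    simp only [Function.comp, zero_add]
    rw [show ((k : Int) + 1) = ((k + 1 : Nat) : Int) by push_cast; ring,
      PySem.List.pyGetD_natCast, PySem.List.pyGetD_natCast]
  rw [hcond, filter_range_nat]
  simp

theorem enumerate_cons (x : Int) (t : List Int) (s : Int) :
    PySem.List.enumerate (x :: t) s = (s, x) :: PySem.List.enumerate t (s + 1) := rfl

theorem enum_foldl (js : List Nat) : ∀ (off : Nat) (ly : List (List Char)),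
    (PySem.List.enumerate (js.map (fun n : Nat => (n : Int))) ((off : Nat) : Int)).foldl
      (fun l p => PySem.List.insert l (p.2 + 1 + p.1) ['|']) ly = applyIns js off ly := by
  induction js with
  | nil => intro off ly; rfl
  | cons j js ih =>
    intro off ly
    rw [List.map_cons, enumerate_cons, List.foldl_cons]
    have h1 : ((off : Int) + 1) = (((off + 1 : Nat)) : Int) := by push_cast; ring
    have h2 : ((j : Int) + 1 + (off : Int)) = (((j + 1 + off : Nat)) : Int) := by push_cast; ring
    show (PySem.List.enumerate _ ((off : Int) + 1)).foldl _ (PySem.List.insert ly ((j : Int) + 1 + off) ['|']) = _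
    rw [h1, h2, ih]
    rfl

-- the port's insertion loop is applyIns
theorem foldl_insert_eq_applyIns (a0 : List Nat) (ly : List (List Char)) :
    (PySem.List.pyRange 0 (((a0.map (fun n : Nat => (n : Int))).length : Int)) 1).foldl
      (fun l i => PySem.List.insert l (PySem.List.pyGetD (a0.map (fun n : Nat => (n : Int))) i 0 + 1 + i) ['|']) ly
    = applyIns a0 0 ly := by
  have he := PySem.List.enumerate_eq_map_pyRange (xs := a0.map (fun n : Nat => (n : Int))) (d := 0)
  have hfold : (PySem.List.enumerate (a0.map (fun n : Nat => (n : Int))) 0).foldl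
      (fun l p => PySem.List.insert l (p.2 + 1 + p.1) ['|']) ly = applyIns a0 0 ly := by
    have := enum_foldl a0 0 ly
    simpa using this
  rw [he, List.foldl_map] at hfold
  simpa using hfold

-- ===== VERDICT (by name: the statement is the Claim_ definition above) =====
theorem renc_spec : Claim_equal_renc := by
  intro xs hdom
  unfold Spec_renc renc renc_alt
  simp only
  rw [PySem.List.foldl_append_singleton_eq_map, List.nil_append]
  rw [filter_range_eq_chg, foldl_insert_eq_applyIns, applyIns_chg, foldl_stepB]
  have hmap : xs.toList.map (fun i => encA i.toNat) = xs.toList.map (fun c => encB c.toNat) := by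
    apply List.map_congr_left
    intro c hc
    have hd : pvDomChar c = true := by
      have := (List.all_eq_true.mp hdom) c hc
      exact this
    apply encA_eq_encB
    simp only [pvDomChar, Bool.or_eq_true, Bool.and_eq_true, decide_eq_true_eq, beq_iff_eq] at hd
    omega
  rw [hmap]
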